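-- pv_equiv track=rewrite | github.com/gribskov/biocomputing | pb_work/kata/fsm.py | traverse_TCP_states
-- ===== SOURCE A (Python) =====
-- def traverse_TCP_states(events):
--     state = "CLOSED"  # initial state, always
--
--     t = {'CLOSED':      {'APP_PASSIVE_OPEN': 'LISTEN', 'APP_ACTIVE_OPEN': 'SYN_SENT'},
--          'LISTEN':      {'RCV_SYN': 'SYN_RCVD', 'APP_SEND': 'SYN_SENT', 'APP_CLOSE': 'CLOSED'},
--          'SYN_RCVD':    {'APP_CLOSE': 'FIN_WAIT_1', 'RCV_ACK': 'ESTABLISHED'},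
--          'SYN_SENT':    {'RCV_SYN': 'SYN_RCVD', 'RCV_SYN_ACK': 'ESTABLISHED', 'APP_CLOSE': 'CLOSED'},
--          'ESTABLISHED': {'APP_CLOSE': 'FIN_WAIT_1', 'RCV_FIN': 'CLOSE_WAIT'},
--          'FIN_WAIT_1':  {'RCV_FIN': 'CLOSING', 'RCV_FIN_ACK': 'TIME_WAIT', 'RCV_ACK': 'FIN_WAIT_2'},
--          'CLOSING':     {'RCV_ACK': 'TIME_WAIT'},
--          'FIN_WAIT_2':  {'RCV_FIN': 'TIME_WAIT'},
--          'TIME_WAIT':   {'APP_TIMEOUT': 'CLOSED'},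
--          'CLOSE_WAIT':  {'APP_CLOSE': 'LAST_ACK'},
--          'LAST_ACK':    {'RCV_ACK': 'CLOSED'},
--          }
--
--     for e in events:
--         try:
--             state = t[state][e]
--         except:
--             return 'ERROR'
--
--     return state
-- ===== SOURCE B (Python) =====
-- _STATES = ['CLOSED', 'LISTEN', 'SYN_RCVD', 'SYN_SENT', 'ESTABLISHED',
--            'FIN_WAIT_1', 'CLOSING', 'FIN_WAIT_2', 'TIME_WAIT',
--            'CLOSE_WAIT', 'LAST_ACK', 'ERROR']
--
-- _RULES = [('CLOSED', 'APP_PASSIVE_OPEN', 'LISTEN'),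
--           ('CLOSED', 'APP_ACTIVE_OPEN', 'SYN_SENT'),
--           ('LISTEN', 'RCV_SYN', 'SYN_RCVD'),
--           ('LISTEN', 'APP_SEND', 'SYN_SENT'),
--           ('LISTEN', 'APP_CLOSE', 'CLOSED'),
--           ('SYN_RCVD', 'APP_CLOSE', 'FIN_WAIT_1'),
--           ('SYN_RCVD', 'RCV_ACK', 'ESTABLISHED'),
--           ('SYN_SENT', 'RCV_SYN', 'SYN_RCVD'),
--           ('SYN_SENT', 'RCV_SYN_ACK', 'ESTABLISHED'),
--           ('SYN_SENT', 'APP_CLOSE', 'CLOSED'),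
--           ('ESTABLISHED', 'APP_CLOSE', 'FIN_WAIT_1'),
--           ('ESTABLISHED', 'RCV_FIN', 'CLOSE_WAIT'),
--           ('FIN_WAIT_1', 'RCV_FIN', 'CLOSING'),
--           ('FIN_WAIT_1', 'RCV_FIN_ACK', 'TIME_WAIT'),
--           ('FIN_WAIT_1', 'RCV_ACK', 'FIN_WAIT_2'),
--           ('CLOSING', 'RCV_ACK', 'TIME_WAIT'),
--           ('FIN_WAIT_2', 'RCV_FIN', 'TIME_WAIT'),
--           ('TIME_WAIT', 'APP_TIMEOUT', 'CLOSED'),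
--           ('CLOSE_WAIT', 'APP_CLOSE', 'LAST_ACK'),
--           ('LAST_ACK', 'RCV_ACK', 'CLOSED')]
--
--
-- def _step_vector(event):
--     # total transition function of `event` on the whole state space,
--     # with ERROR absorbing: v[i] = index of the successor of state i
--     v = [len(_STATES) - 1] * len(_STATES)
--     for src, ev, dst in _RULES:
--         if ev == event:
--             v[_STATES.index(src)] = _STATES.index(dst)
--     return v
--
--
-- def traverse_TCP_states(events):
--     # compose the per-event transition functions right-to-left, then
--     # apply the composite function to the start state CLOSED
--     comp = list(range(len(_STATES)))
--     for e in reversed(events):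
--         step = _step_vector(e)
--         comp = [comp[step[i]] for i in range(len(_STATES))]
--     return _STATES[comp[0]]
-- ===== Notes on version B (the rewrite author's own statement) =====
-- stated objective: alternative
-- what changed: B views the DFA through its transition monoid: each event becomes a total successor vector over the 12-element state space (ERROR absorbing), the vectors are composed right-to-left over reversed(events), and the composite function is applied once to CLOSED, instead of A's single-state walk with a per-call nested dict and try/except.
import Mathlib
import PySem

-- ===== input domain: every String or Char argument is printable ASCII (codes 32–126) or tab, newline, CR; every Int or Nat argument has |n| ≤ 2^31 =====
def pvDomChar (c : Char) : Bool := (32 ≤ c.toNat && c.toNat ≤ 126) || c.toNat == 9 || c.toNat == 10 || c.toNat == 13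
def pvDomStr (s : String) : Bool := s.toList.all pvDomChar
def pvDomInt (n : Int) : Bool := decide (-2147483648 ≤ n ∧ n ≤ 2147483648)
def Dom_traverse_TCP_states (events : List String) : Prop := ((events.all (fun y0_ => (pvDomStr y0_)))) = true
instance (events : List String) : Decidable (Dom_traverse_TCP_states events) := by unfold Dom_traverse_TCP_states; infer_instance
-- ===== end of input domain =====

-- B recasts the run as composition of per-event total transition vectors over the
-- whole state space (ERROR absorbing), composed right-to-left and applied to CLOSED
-- (alternative algorithm, same return value on every input).

-- ===== PORT A =====
-- the literal nested dict t from A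
def pvT : PySem.Dict String (PySem.Dict String String) :=
  PySem.Dict.mk [
    ("CLOSED",      PySem.Dict.mk [("APP_PASSIVE_OPEN", "LISTEN"), ("APP_ACTIVE_OPEN", "SYN_SENT")]),
    ("LISTEN",      PySem.Dict.mk [("RCV_SYN", "SYN_RCVD"), ("APP_SEND", "SYN_SENT"), ("APP_CLOSE", "CLOSED")]),
    ("SYN_RCVD",    PySem.Dict.mk [("APP_CLOSE", "FIN_WAIT_1"), ("RCV_ACK", "ESTABLISHED")]),
    ("SYN_SENT",    PySem.Dict.mk [("RCV_SYN", "SYN_RCVD"), ("RCV_SYN_ACK", "ESTABLISHED"), ("APP_CLOSE", "CLOSED")]),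
    ("ESTABLISHED", PySem.Dict.mk [("APP_CLOSE", "FIN_WAIT_1"), ("RCV_FIN", "CLOSE_WAIT")]),
    ("FIN_WAIT_1",  PySem.Dict.mk [("RCV_FIN", "CLOSING"), ("RCV_FIN_ACK", "TIME_WAIT"), ("RCV_ACK", "FIN_WAIT_2")]),
    ("CLOSING",     PySem.Dict.mk [("RCV_ACK", "TIME_WAIT")]),
    ("FIN_WAIT_2",  PySem.Dict.mk [("RCV_FIN", "TIME_WAIT")]),
    ("TIME_WAIT",   PySem.Dict.mk [("APP_TIMEOUT", "CLOSED")]),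
    ("CLOSE_WAIT",  PySem.Dict.mk [("APP_CLOSE", "LAST_ACK")]),
    ("LAST_ACK",    PySem.Dict.mk [("RCV_ACK", "CLOSED")])]

-- the for-loop over events: t[state][e] under try/except (lookup failure -> 'ERROR')
def pvGoA (state : String) : List String → String
  | [] => state
  | e :: rest =>
    match (pvT.get? state).bind (fun d => d.get? e) with
    | none => "ERROR"
    | some s => pvGoA s rest

def traverse_TCP_states (events : List String) : String := pvGoA "CLOSED" events

-- ===== PORT B =====
-- _STATES
def pvStatesB : List String :=
  ["CLOSED", "LISTEN", "SYN_RCVD", "SYN_SENT", "ESTABLISHED", "FIN_WAIT_1",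
   "CLOSING", "FIN_WAIT_2", "TIME_WAIT", "CLOSE_WAIT", "LAST_ACK", "ERROR"]

-- _RULES
def pvRulesB : List (String × String × String) :=
  [("CLOSED", "APP_PASSIVE_OPEN", "LISTEN"),
   ("CLOSED", "APP_ACTIVE_OPEN", "SYN_SENT"),
   ("LISTEN", "RCV_SYN", "SYN_RCVD"),
   ("LISTEN", "APP_SEND", "SYN_SENT"),
   ("LISTEN", "APP_CLOSE", "CLOSED"),
   ("SYN_RCVD", "APP_CLOSE", "FIN_WAIT_1"),
   ("SYN_RCVD", "RCV_ACK", "ESTABLISHED"),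
   ("SYN_SENT", "RCV_SYN", "SYN_RCVD"),
   ("SYN_SENT", "RCV_SYN_ACK", "ESTABLISHED"),
   ("SYN_SENT", "APP_CLOSE", "CLOSED"),
   ("ESTABLISHED", "APP_CLOSE", "FIN_WAIT_1"),
   ("ESTABLISHED", "RCV_FIN", "CLOSE_WAIT"),
   ("FIN_WAIT_1", "RCV_FIN", "CLOSING"),
   ("FIN_WAIT_1", "RCV_FIN_ACK", "TIME_WAIT"),
   ("FIN_WAIT_1", "RCV_ACK", "FIN_WAIT_2"),
   ("CLOSING", "RCV_ACK", "TIME_WAIT"),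
   ("FIN_WAIT_2", "RCV_FIN", "TIME_WAIT"),
   ("TIME_WAIT", "APP_TIMEOUT", "CLOSED"),
   ("CLOSE_WAIT", "APP_CLOSE", "LAST_ACK"),
   ("LAST_ACK", "RCV_ACK", "CLOSED")]

-- _STATES.index(s): the rules only mention states of _STATES, so .index never raises;
-- getD 0 is exact there
def pvIdx (s : String) : Nat := (PySem.List.index? pvStatesB s).getD 0

-- _step_vector(event)
def pvStepVector (event : String) : List Nat :=
  pvRulesB.foldl
    (fun v r => if r.2.1 = event then v.set (pvIdx r.1) (pvIdx r.2.2) else v)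
    (List.replicate pvStatesB.length (pvStatesB.length - 1))

-- traverse_TCP_states of Source B; comp and step always have length 12 with entries < 12,
-- so the indexings comp[step[i]], comp[0] and _STATES[comp[0]] are in range and getD is exact
def traverse_TCP_states_alt (events : List String) : String :=
  let comp := events.reverse.foldl
    (fun comp e =>
      let step := pvStepVector e
      (List.range pvStatesB.length).map (fun i => comp.getD (step.getD i 0) 0))
    (List.range pvStatesB.length)
  pvStatesB.getD (comp.getD 0 0) "ERROR"

-- ===== PRECONDITION & SPEC =====
def Spec_traverse_TCP_states (events : List String) (out : String) : Prop := out = traverse_TCP_states_alt events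
instance (events : List String) (out : String) : Decidable (Spec_traverse_TCP_states events out) := by unfold Spec_traverse_TCP_states; infer_instance

-- ===== CLAIM (what is proved, stated in full; the proofs are below) =====
def Claim_equal_traverse_TCP_states : Prop := ∀ (events : List String), Dom_traverse_TCP_states events → Spec_traverse_TCP_states events (traverse_TCP_states events)

-- ===== LEMMAS AND PROOFS =====

-- the event names occurring in the table
def pvEventsL : List String :=
  ["APP_PASSIVE_OPEN", "APP_ACTIVE_OPEN", "RCV_SYN", "APP_SEND", "APP_CLOSE",
   "RCV_ACK", "RCV_SYN_ACK", "RCV_FIN", "RCV_FIN_ACK", "APP_TIMEOUT"]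

-- A's one step
def pvStepA (s e : String) : Option String := (pvT.get? s).bind (fun d => d.get? e)

theorem pvGoA_error (es : List String) : pvGoA "ERROR" es = "ERROR" := by
  cases es with
  | nil => rfl
  | cons e rest => simp [pvGoA, pvT, PySem.Dict.get?]

-- the foldr form of B's composition loop
def pvCompR : List String → List Nat
  | [] => List.range pvStatesB.length
  | e :: rest =>
    let comp := pvCompR rest
    let step := pvStepVector e
    (List.range pvStatesB.length).map (fun i => comp.getD (step.getD i 0) 0)

theorem pvCompR_eq_foldl (events : List String) :
    events.reverse.foldl
      (fun comp e =>
        let step := pvStepVector e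
        (List.range pvStatesB.length).map (fun i => comp.getD (step.getD i 0) 0))
      (List.range pvStatesB.length) = pvCompR events := by
  rw [List.foldl_reverse]
  induction events with
  | nil => rfl
  | cons e rest ih =>
    rw [List.foldr_cons, ih]
    rfl

-- one step of A against B's step vector, on every state index
theorem pv_step_char (e : String) :
    ∀ i, i < 12 →
      (pvStepVector e).getD i 0 < 12 ∧
      (((pvStepVector e).getD i 0 = 11 ∧ pvStepA (pvStatesB.getD i "ERROR") e = none) ∨
        pvStepA (pvStatesB.getD i "ERROR") e =
          some (pvStatesB.getD ((pvStepVector e).getD i 0) "ERROR")) := by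
  by_cases he : e ∈ pvEventsL
  · simp only [pvEventsL, List.mem_cons, List.not_mem_nil, or_false] at he
    rcases he with rfl | rfl | rfl | rfl | rfl | rfl | rfl | rfl | rfl | rfl <;> decide
  · simp only [pvEventsL, List.mem_cons, List.not_mem_nil, or_false] at he
    push Not at he
    obtain ⟨h1, h2, h3, h4, h5, h6, h7, h8, h9, h10⟩ := he
    have hv : pvStepVector e = List.replicate 12 11 := by
      simp [pvStepVector, pvRulesB, List.foldl,
        Ne.symm h1, Ne.symm h2, Ne.symm h3, Ne.symm h4, Ne.symm h5,
        Ne.symm h6, Ne.symm h7, Ne.symm h8, Ne.symm h9, Ne.symm h10]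
      rfl
    intro i hi
    rw [hv]
    have hg : (List.replicate 12 11).getD i 0 = 11 := by
      interval_cases i <;> rfl
    rw [hg]
    refine ⟨by norm_num, Or.inl ⟨rfl, ?_⟩⟩
    interval_cases i <;>
      simp [pvStepA, pvT, pvStatesB, PySem.Dict.get?,
        Ne.symm h1, Ne.symm h2, Ne.symm h3, Ne.symm h4, Ne.symm h5,
        Ne.symm h6, Ne.symm h7, Ne.symm h8, Ne.symm h9, Ne.symm h10]

theorem pv_map_range_getD (f : Nat → Nat) (i : Nat) (hi : i < 12) :
    ((List.range 12).map f).getD i 0 = f i := by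
  interval_cases i <;> rfl

-- main invariant: the composite vector tabulates pvGoA on every state
theorem pv_main (es : List String) :
    ∀ i, i < 12 →
      (pvCompR es).getD i 0 < 12 ∧
      pvStatesB.getD ((pvCompR es).getD i 0) "ERROR" = pvGoA (pvStatesB.getD i "ERROR") es := by
  induction es with
  | nil => decide
  | cons e rest ih =>
    intro i hi
    have hlen : pvStatesB.length = 12 := rfl
    have hc : (pvCompR (e :: rest)).getD i 0 =
        (pvCompR rest).getD ((pvStepVector e).getD i 0) 0 := by
      show (((List.range pvStatesB.length).map
        (fun i => (pvCompR rest).getD ((pvStepVector e).getD i 0) 0)).getD i 0) = _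
      rw [hlen]
      exact pv_map_range_getD _ i hi
    obtain ⟨hj, hstep⟩ := pv_step_char e i hi
    obtain ⟨hjc, hjv⟩ := ih _ hj
    rw [hc]
    refine ⟨hjc, ?_⟩
    rcases hstep with ⟨h11, hnone⟩ | hsome
    · -- unmatched pair: A returns 'ERROR'; B goes through the absorbing state 11
      simp only [pvStepA, List.getD_eq_getElem?_getD] at hnone
      have hEA : pvGoA (pvStatesB.getD i "ERROR") (e :: rest) = "ERROR" := by
        simp [pvGoA, List.getD_eq_getElem?_getD, hnone]
      rw [hEA, h11]
      rw [h11] at hjv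
      rw [hjv]
      exact pvGoA_error rest
    · simp only [pvStepA, List.getD_eq_getElem?_getD] at hsome
      have hEA : pvGoA (pvStatesB.getD i "ERROR") (e :: rest) =
          pvGoA (pvStatesB.getD ((pvStepVector e).getD i 0) "ERROR") rest := by
        simp [pvGoA, List.getD_eq_getElem?_getD, hsome]
      rw [hEA]
      exact hjv

-- ===== VERDICT (by name: the statement is the Claim_ definition above) =====
theorem traverse_TCP_states_spec : Claim_equal_traverse_TCP_states := by
  intro events _
  unfold Spec_traverse_TCP_states traverse_TCP_states traverse_TCP_states_alt
  rw [pvCompR_eq_foldl]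
  exact ((pv_main events 0 (by norm_num)).2).symm
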